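-- pv_equiv track=rewrite | github.com/ebubekirbastama/Ebs_seo_toolbox | seo_toolbox_gui.py | estimate_title_pixels
-- ===== SOURCE A (Python) =====
-- def estimate_title_pixels(title: str) -> int:
--     if not title:
--         return 0
--     width = 0
--     for ch in title:
--         if ch.isupper():
--             width += 8
--         elif ch in "il":
--             width += 4
--         elif ch in "MW@#%&":
--             width += 10
--         else:
--             width += 7
--     return width
-- ===== SOURCE B (Python) =====
-- def estimate_title_pixels(title: str) -> int:
--     up = sum(c.isupper() for c in title)
--     il = sum(c in "il" for c in title)
--     special = sum(c in "@#%&" for c in title)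
--     return 8 * up + 4 * il + 10 * special + 7 * (len(title) - up - il - special)
-- ===== Notes on version B (the rewrite author's own statement) =====
-- stated objective: simpler
-- what changed: Replaced the per-character if/elif accumulation loop (with its empty-string guard) by three independent category counts combined in one closed-form arithmetic expression; the len-based remainder makes the empty-string guard unnecessary.
import Mathlib
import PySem

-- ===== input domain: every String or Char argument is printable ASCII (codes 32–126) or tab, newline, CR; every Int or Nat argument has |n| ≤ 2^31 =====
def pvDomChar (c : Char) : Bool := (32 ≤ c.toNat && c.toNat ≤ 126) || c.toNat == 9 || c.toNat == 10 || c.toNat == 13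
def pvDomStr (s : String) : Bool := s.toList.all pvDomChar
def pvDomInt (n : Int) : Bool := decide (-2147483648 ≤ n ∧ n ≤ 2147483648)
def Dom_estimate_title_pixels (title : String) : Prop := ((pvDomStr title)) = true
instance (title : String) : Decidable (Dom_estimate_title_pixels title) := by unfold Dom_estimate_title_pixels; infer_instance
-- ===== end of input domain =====

-- B replaces A's per-character if/elif accumulation loop by three independent category counts
-- combined in one closed-form arithmetic expression (objective: simpler).

-- ===== PORT A =====
-- A-side helper: the body of A's per-character if/elif chain.
def pvStepA (width : Int) (ch : Char) : Int :=
  if PySem.Chars.isupper ch then width + 8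
  else if ch == 'i' || ch == 'l' then width + 4
  else if ch == 'M' || ch == 'W' || ch == '@' || ch == '#' || ch == '%' || ch == '&' then width + 10
  else width + 7

def estimate_title_pixels (title : String) : Int :=
  if title.toList = [] then 0
  else title.toList.foldl pvStepA 0

-- ===== PORT B =====
def estimate_title_pixels_alt (title : String) : Int :=
  let cs := title.toList
  let up : Int := cs.countP (fun c => PySem.Chars.isupper c)
  let il : Int := cs.countP (fun c => c == 'i' || c == 'l')
  let special : Int := cs.countP (fun c => c == '@' || c == '#' || c == '%' || c == '&')
  8 * up + 4 * il + 10 * special + 7 * ((cs.length : Int) - up - il - special)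

-- ===== PRECONDITION & SPEC =====
def Spec_estimate_title_pixels (title : String) (out : Int) : Prop := out = estimate_title_pixels_alt title
instance (title : String) (out : Int) : Decidable (Spec_estimate_title_pixels title out) := by unfold Spec_estimate_title_pixels; infer_instance

-- ===== CLAIM (what is proved, stated in full; the proofs are below) =====
def Claim_equal_estimate_title_pixels : Prop := ∀ (title : String), Dom_estimate_title_pixels title → Spec_estimate_title_pixels title (estimate_title_pixels title)

-- ===== LEMMAS AND PROOFS =====

-- B's value, as a function of the character list (what _alt computes after unfolding its lets).
def pvAltList (cs : List Char) : Int :=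
  8 * (cs.countP (fun c => PySem.Chars.isupper c) : Int)
  + 4 * (cs.countP (fun c => c == 'i' || c == 'l') : Int)
  + 10 * (cs.countP (fun c => c == '@' || c == '#' || c == '%' || c == '&') : Int)
  + 7 * ((cs.length : Int)
      - (cs.countP (fun c => PySem.Chars.isupper c) : Int)
      - (cs.countP (fun c => c == 'i' || c == 'l') : Int)
      - (cs.countP (fun c => c == '@' || c == '#' || c == '%' || c == '&') : Int))

lemma pvAlt_eq (title : String) : estimate_title_pixels_alt title = pvAltList title.toList := rfl

-- Per character, A's if/elif contribution matches B's closed-form contribution.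
lemma pvStep_char (a : Int) (c : Char) :
    pvStepA a c =
      a + (8 * (if PySem.Chars.isupper c then (1 : Int) else 0)
        + 4 * (if (c == 'i' || c == 'l') then (1 : Int) else 0)
        + 10 * (if (c == '@' || c == '#' || c == '%' || c == '&') then (1 : Int) else 0)
        + 7 * (1 - (if PySem.Chars.isupper c then (1 : Int) else 0)
              - (if (c == 'i' || c == 'l') then (1 : Int) else 0)
              - (if (c == '@' || c == '#' || c == '%' || c == '&') then (1 : Int) else 0))) := by
  unfold pvStepA
  by_cases hi : (c == 'i' || c == 'l') = true
  · have hc : c = 'i' ∨ c = 'l' := by simpa using hi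
    have hu : PySem.Chars.isupper c = false := by rcases hc with h | h <;> subst h <;> decide
    have hs : (c == '@' || c == '#' || c == '%' || c == '&') = false := by
      rcases hc with h | h <;> subst h <;> decide
    simp [hu, hi, hs]
  · by_cases hs : (c == '@' || c == '#' || c == '%' || c == '&') = true
    · have hc : c = '@' ∨ c = '#' ∨ c = '%' ∨ c = '&' := by simpa [or_assoc] using hs
      have hu : PySem.Chars.isupper c = false := by
        rcases hc with h | h | h | h <;> subst h <;> decide
      have h6 : (c == 'M' || c == 'W' || c == '@' || c == '#' || c == '%' || c == '&') = true := by
        rcases hc with h | h | h | h <;> subst h <;> decide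
      simp [hu, hi, hs, h6]
    · by_cases hmw : (c == 'M' || c == 'W') = true
      · have hc : c = 'M' ∨ c = 'W' := by simpa using hmw
        have hu : PySem.Chars.isupper c = true := by rcases hc with h | h <;> subst h <;> decide
        simp [hu, hi, hs]
      · rw [Bool.not_eq_true] at hmw hs
        obtain ⟨hM, hW⟩ := Bool.or_eq_false_iff.mp hmw
        obtain ⟨h1, hC⟩ := Bool.or_eq_false_iff.mp hs
        obtain ⟨h2, hP⟩ := Bool.or_eq_false_iff.mp h1
        obtain ⟨hA, hH⟩ := Bool.or_eq_false_iff.mp h2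
        by_cases hu : PySem.Chars.isupper c = true
        · simp [hu, hi, hA, hH, hP, hC]
        · rw [Bool.not_eq_true] at hu
          simp [hu, hi, hM, hW, hA, hH, hP, hC]

lemma pvFoldl_eq (cs : List Char) : ∀ a : Int, cs.foldl pvStepA a = a + pvAltList cs := by
  induction cs with
  | nil => intro a; simp [pvAltList]
  | cons c cs ih =>
    intro a
    rw [List.foldl_cons, ih, pvStep_char]
    unfold pvAltList
    simp only [List.countP_cons, List.length_cons]
    split_ifs <;> push_cast <;> ring

-- ===== VERDICT (by name: the statement is the Claim_ definition above) =====
theorem estimate_title_pixels_spec : Claim_equal_estimate_title_pixels := by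
  intro title _
  unfold Spec_estimate_title_pixels estimate_title_pixels
  rw [pvAlt_eq]
  by_cases h : title.toList = []
  · simp [h, pvAltList]
  · rw [if_neg h, pvFoldl_eq, zero_add]
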